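-- pv_equiv track=rewrite | github.com/DancingOnAir/LeetcodePythonSolution | BitManipulation/2305_fair_distribution_of_cookies.py | distributeCookies2
-- ===== SOURCE A (Python) =====
-- from typing import List
--
-- def distributeCookies2(cookies: List[int], k: int) -> int:
--     n = len(cookies)
--     m = 1 << n
--     # SUM[i] 表示分配的饼干集合为i，设集合i的元素和为SUM[i]
--     SUM = [0] * m
--     for i, v in enumerate(cookies):
--         for j in range(1 << i):
--             SUM[(1 << i) | j] = SUM[j] + v
--
--     # dp[i][mask] 表示前i个小朋友，分mask的bit位为1的糖的不平等最小值
--     f = SUM.copy()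
--     for i in range(1, k):
--         for j in range(m - 1, 0, -1):
--             s = j
--             while s:
--                 v = f[j ^ s]
--                 if SUM[s] > v:
--                     v = SUM[s]
--                 if v < f[j]:
--                     f[j] = v
--                 s = (s - 1) & j
--     return f[-1]
-- ===== SOURCE B (Python) =====
-- def distributeCookies2(cookies, k):
--     n = len(cookies)
--     m = 1 << n
--     def ssum(mask):
--         return sum(c for i, c in enumerate(cookies) if (mask >> i) & 1)
--     ss = [ssum(mask) for mask in range(m)]
--     row = ss
--     for _ in range(1, k):
--         row = [min([row[mask]] +
--                    [max(ss[s], row[mask ^ s])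
--                     for s in range(1, mask + 1) if s & mask == s])
--                for mask in range(m)]
--     return row[-1]
-- ===== Notes on version B (the rewrite author's own statement) =====
-- stated objective: simpler
-- what changed: Same min-max subset recurrence, but computed with direct per-mask subset sums and a filtered full-range submask scan over freshly built functional rows, replacing A's incrementally bit-built SUM table, in-place rolling array with descending masks and (s-1)&j chain enumeration.
import Mathlib
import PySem

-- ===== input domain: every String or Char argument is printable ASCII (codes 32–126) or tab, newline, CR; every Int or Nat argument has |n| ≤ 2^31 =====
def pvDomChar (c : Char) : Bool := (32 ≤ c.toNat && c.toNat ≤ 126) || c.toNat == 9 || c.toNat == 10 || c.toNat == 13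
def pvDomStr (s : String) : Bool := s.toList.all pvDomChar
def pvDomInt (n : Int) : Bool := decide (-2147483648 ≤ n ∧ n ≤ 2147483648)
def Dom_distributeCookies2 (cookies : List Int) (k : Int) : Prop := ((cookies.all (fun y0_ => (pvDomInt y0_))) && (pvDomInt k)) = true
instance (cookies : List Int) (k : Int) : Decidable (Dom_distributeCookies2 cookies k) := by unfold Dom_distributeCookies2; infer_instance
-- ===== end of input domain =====

-- B computes the same min-max value with direct subset sums, a filtered full-range submask
-- scan and freshly built rows, replacing A's bit-built SUM table, in-place rolling array
-- and (s-1)&j chain enumeration (objective: simpler; not faster).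

-- ===== PORT A =====
-- inner loop 'for j in range(1 << i): SUM[(1 << i) | j] = SUM[j] + v'  (p = 1 << i)
def pvA_sumInner (v : Int) (p : Nat) (SUM0 : List Int) : List Int :=
  (List.range p).foldl (fun S j => S.set (p ||| j) (S.getD j 0 + v)) SUM0

-- 'SUM = [0] * m; for i, v in enumerate(cookies): …'
def pvA_buildSUM (cookies : List Int) : List Int :=
  cookies.zipIdx.foldl (fun S iv => pvA_sumInner iv.1 (1 <<< iv.2) S)
    (List.replicate (1 <<< cookies.length) 0)

-- the 'while s:' loop of A; state f, counter s
def pvA_chain (SUM : List Int) (j : Nat) (f : List Int) (s : Nat) : List Int :=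
  if hs : s = 0 then f
  else
    let v0 := f.getD (j ^^^ s) 0
    let v1 := if SUM.getD s 0 > v0 then SUM.getD s 0 else v0
    let f' := if v1 < f.getD j 0 then f.set j v1 else f
    pvA_chain SUM j f' ((s - 1) &&& j)
termination_by s
decreasing_by
  have h1 : (s - 1) &&& j ≤ s - 1 := Nat.and_le_left
  omega

-- 'for j in range(m - 1, 0, -1): …'
def pvA_round (SUM : List Int) (m : Nat) (f0 : List Int) : List Int :=
  (PySem.List.pyRange ((m : Int) - 1) 0 (-1)).foldl
    (fun f j => pvA_chain SUM j.toNat f j.toNat) f0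

def distributeCookies2 (cookies : List Int) (k : Int) : Int :=
  let n := cookies.length
  let m := 1 <<< n
  let SUM := pvA_buildSUM cookies
  let f := (PySem.List.pyRange 1 k 1).foldl (fun f _ => pvA_round SUM m f) SUM
  (PySem.List.pyGet? f (-1)).getD 0

-- ===== PORT B =====
-- 'sum(c for i, c in enumerate(cookies) if (mask >> i) & 1)'
def pvB_ssum (cookies : List Int) (mask : Nat) : Int :=
  cookies.zipIdx.foldl (fun acc ci => if (mask >>> ci.2) &&& 1 = 1 then acc + ci.1 else acc) 0

-- '[s for s in range(1, mask + 1) if s & mask == s]'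
def pvB_subsets (mask : Nat) : List Nat :=
  (List.range' 1 mask).filter (fun s => s &&& mask == s)

-- 'min([row[mask]] + [max(ss[s], row[mask ^ s]) for s in …])'
def pvB_newRow (ss row : List Int) (mask : Nat) : Int :=
  (pvB_subsets mask).foldl
    (fun acc s => min acc (max (ss.getD s 0) (row.getD (mask ^^^ s) 0)))
    (row.getD mask 0)

def distributeCookies2_alt (cookies : List Int) (k : Int) : Int :=
  let m := 1 <<< cookies.length
  let ss := (List.range m).map (pvB_ssum cookies)
  let row := (PySem.List.pyRange 1 k 1).foldl
    (fun row _ => (List.range m).map (pvB_newRow ss row)) ss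
  (PySem.List.pyGet? row (-1)).getD 0

-- ===== PRECONDITION & SPEC =====
def Spec_distributeCookies2 (cookies : List Int) (k : Int) (out : Int) : Prop := out = distributeCookies2_alt cookies k
instance (cookies : List Int) (k : Int) (out : Int) : Decidable (Spec_distributeCookies2 cookies k out) := by unfold Spec_distributeCookies2; infer_instance

-- ===== CLAIM (what is proved, stated in full; the proofs are below) =====
def Claim_equal_distributeCookies2 : Prop := ∀ (cookies : List Int) (k : Int), Dom_distributeCookies2 cookies k → Spec_distributeCookies2 cookies k (distributeCookies2 cookies k)

-- ===== LEMMAS AND PROOFS =====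

-- ---- bit toolkit ----
theorem pv_and_mod2_bit (m n : Nat) : (m &&& n) % 2 = (m % 2) &&& (n % 2) := by
  have h : (m &&& n) &&& 1 = (m &&& 1) &&& (n &&& 1) := by
    apply Nat.eq_of_testBit_eq; intro i
    simp only [Nat.testBit_and]
    cases m.testBit i <;> cases n.testBit i <;> cases (1:Nat).testBit i <;> simp
  simpa [Nat.and_one_is_mod] using h

theorem pv_and_mod2 (m n : Nat) : (m &&& n) % 2 = if m % 2 = 1 ∧ n % 2 = 1 then 1 else 0 := by
  rw [pv_and_mod2_bit]
  rcases Nat.mod_two_eq_zero_or_one m with hm | hm <;> rcases Nat.mod_two_eq_zero_or_one n with hn | hn <;>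
    rw [hm, hn] <;> simp

theorem pv_or_mod2_bit (m n : Nat) : (m ||| n) % 2 = (m % 2) ||| (n % 2) := by
  have h : (m ||| n) &&& 1 = (m &&& 1) ||| (n &&& 1) := by
    apply Nat.eq_of_testBit_eq; intro i
    simp only [Nat.testBit_and, Nat.testBit_or]
    cases m.testBit i <;> cases n.testBit i <;> cases (1:Nat).testBit i <;> simp
  simpa [Nat.and_one_is_mod] using h

theorem pv_or_mod2 (m n : Nat) : (m ||| n) % 2 = if m % 2 = 1 ∨ n % 2 = 1 then 1 else 0 := by
  rw [pv_or_mod2_bit]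
  rcases Nat.mod_two_eq_zero_or_one m with hm | hm <;> rcases Nat.mod_two_eq_zero_or_one n with hn | hn <;>
    rw [hm, hn] <;> simp

theorem pv_and_div2 (m n : Nat) : (m &&& n) / 2 = m / 2 &&& n / 2 := by
  apply Nat.eq_of_testBit_eq; intro i
  simp [Nat.testBit_div_two, Nat.testBit_and]

theorem pv_or_div2 (m n : Nat) : (m ||| n) / 2 = m / 2 ||| n / 2 := by
  apply Nat.eq_of_testBit_eq; intro i
  simp [Nat.testBit_div_two, Nat.testBit_or]

theorem pv_and_recon (m n : Nat) : m &&& n = 2 * (m / 2 &&& n / 2) + ((m &&& n) % 2) := by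
  conv_lhs => rw [← Nat.div_add_mod (m &&& n) 2]
  rw [pv_and_div2]

theorem pv_or_recon (m n : Nat) : m ||| n = 2 * (m / 2 ||| n / 2) + ((m ||| n) % 2) := by
  conv_lhs => rw [← Nat.div_add_mod (m ||| n) 2]
  rw [pv_or_div2]

theorem pv_submask_le {t j : Nat} (h : t &&& j = t) : t ≤ j := by
  calc t = t &&& j := h.symm
  _ ≤ j := Nat.and_le_right

theorem pv_and_j_j (x j : Nat) : (x &&& j) &&& j = x &&& j := by
  apply Nat.eq_of_testBit_eq; intro i
  simp only [Nat.testBit_and]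
  cases x.testBit i <;> cases j.testBit i <;> simp

theorem pv_xor_submask {s j : Nat} (h : s &&& j = s) : (j ^^^ s) &&& j = j ^^^ s := by
  apply Nat.eq_of_testBit_eq; intro i
  have hb : s.testBit i = (s.testBit i && j.testBit i) := by
    conv_lhs => rw [← h]
    simp [Nat.testBit_and]
  simp only [Nat.testBit_and, Nat.testBit_xor]
  cases hj : j.testBit i <;> cases hsb : s.testBit i <;> simp [hj, hsb] at hb ⊢

theorem pv_xor_lt {s j : Nat} (h : s &&& j = s) (hs : s ≠ 0) : j ^^^ s < j := by
  have hle : j ^^^ s ≤ j := pv_submask_le (pv_xor_submask h)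
  have hne : j ^^^ s ≠ j := by
    intro heq
    apply hs
    have h2 : j ^^^ (j ^^^ s) = j ^^^ j := by rw [heq]
    rwa [← Nat.xor_assoc, Nat.xor_self, Nat.zero_xor] at h2
  omega

-- key fact: for submasks t < s of j, t ≤ (s-1) &&& j (the chain step skips no submask)
theorem pv_pred_submask : ∀ s j t : Nat, s &&& j = s → t &&& j = t → t < s → t ≤ (s - 1) &&& j := by
  intro s
  induction s using Nat.strong_induction_on with
  | _ s IH =>
    intro j t hs ht hlt
    have hsd : s / 2 &&& j / 2 = s / 2 := by
      have h := pv_and_div2 s j; rw [hs] at h; exact h.symm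
    have htd : t / 2 &&& j / 2 = t / 2 := by
      have h := pv_and_div2 t j; rw [ht] at h; exact h.symm
    have hsm : s % 2 ≤ j % 2 := by
      have h1 := pv_and_mod2 s j
      rw [hs] at h1
      have h2 := Nat.mod_two_eq_zero_or_one s
      have h3 := Nat.mod_two_eq_zero_or_one j
      split at h1 <;> omega
    have htm : t % 2 ≤ j % 2 := by
      have h1 := pv_and_mod2 t j
      rw [ht] at h1
      have h2 := Nat.mod_two_eq_zero_or_one t
      have h3 := Nat.mod_two_eq_zero_or_one j
      split at h1 <;> omega
    have hj2 := Nat.mod_two_eq_zero_or_one j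
    rcases Nat.mod_two_eq_zero_or_one s with hpar | hpar
    · have hs2 : 0 < s / 2 := by omega
      have hrec := pv_and_recon (s - 1) j
      have hd : (s - 1) / 2 = s / 2 - 1 := by omega
      have hm : (s - 1) % 2 = 1 := by omega
      have hmod := pv_and_mod2 (s - 1) j
      rw [hm] at hmod
      rw [hd] at hrec
      rcases Nat.eq_zero_or_pos (t / 2) with ht0 | htpos
      · split at hmod <;> omega
      · have hlt2 : t / 2 < s / 2 := by omega
        have hIH := IH (s / 2) (by omega) (j / 2) (t / 2) hsd htd hlt2
        split at hmod <;> omega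
    · have hd : (s - 1) / 2 = s / 2 := by omega
      have hm : (s - 1) % 2 = 0 := by omega
      have hrec := pv_and_recon (s - 1) j
      rw [hd, hsd] at hrec
      have hmm := pv_and_mod2 (s - 1) j
      rw [hm] at hmm
      simp at hmm
      omega

theorem pv_or_pow_add : ∀ i j : Nat, j < 2 ^ i → 2 ^ i ||| j = 2 ^ i + j := by
  intro i
  induction i with
  | zero =>
    intro j hj
    interval_cases j
    decide
  | succ i IH =>
    intro j hj
    have hp : (2 : Nat) ^ (i + 1) = 2 * 2 ^ i := by ring
    have hrec := pv_or_recon (2 ^ (i + 1)) j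
    have hd : 2 ^ (i + 1) / 2 = 2 ^ i := by omega
    have hm2 : 2 ^ (i + 1) % 2 = 0 := by omega
    have hmod := pv_or_mod2 (2 ^ (i + 1)) j
    rw [hm2] at hmod
    have hj2 : j / 2 < 2 ^ i := by omega
    have hIH := IH (j / 2) hj2
    rw [hd, hIH] at hrec
    have hj3 := Nat.mod_two_eq_zero_or_one j
    split at hmod <;> omega

-- ---- list access helpers ----
theorem pv_getD_set_self (f : List Int) (j : Nat) (x : Int) (h : j < f.length) :
    (f.set j x).getD j 0 = x := by
  rw [List.getD_eq_getElem?_getD, List.getElem?_set_self (by omega), Option.getD_some]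

theorem pv_getD_set_ne (f : List Int) (i j : Nat) (x : Int) (h : i ≠ j) :
    (f.set i x).getD j 0 = f.getD j 0 := by
  rw [List.getD_eq_getElem?_getD, List.getElem?_set_ne h, ← List.getD_eq_getElem?_getD]

theorem pv_set_getD_self (f : List Int) (j : Nat) (h : j < f.length) :
    f.set j (f.getD j 0) = f := by
  have hg : f.getD j 0 = f[j] := by
    rw [List.getD_eq_getElem?_getD, List.getElem?_eq_getElem h]; rfl
  rw [hg]
  exact List.set_getElem_self h

theorem pv_if_max (a b : Int) : (if a > b then a else b) = max a b := by
  split <;> omega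

-- ---- reference subset-sum (bit recursion) ----
def pvPsum : List Int → Nat → Int
  | [], _ => 0
  | c :: t, mask => (if mask % 2 = 1 then c else 0) + pvPsum t (mask / 2)

theorem pvPsum_zero (cs : List Int) : pvPsum cs 0 = 0 := by
  induction cs with
  | nil => rfl
  | cons c t IH => simp [pvPsum, IH]

theorem pvPsum_pow_add : ∀ (cs : List Int) (i j : Nat), j < 2 ^ i →
    pvPsum cs (2 ^ i + j) = cs.getD i 0 + pvPsum cs j := by
  intro cs
  induction cs with
  | nil => intro i j hj; simp [pvPsum]
  | cons c t IH =>
    intro i j hj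
    cases i with
    | zero =>
      interval_cases j
      simp [pvPsum, pvPsum_zero]
    | succ i =>
      have hp : (2:Nat) ^ (i+1) = 2 * 2 ^ i := by ring
      have hm : (2 ^ (i+1) + j) % 2 = j % 2 := by omega
      have hd : (2 ^ (i+1) + j) / 2 = 2 ^ i + j / 2 := by omega
      have hj2 : j / 2 < 2 ^ i := by omega
      simp only [pvPsum, hm, hd, IH i (j/2) hj2, List.getD_cons_succ]
      ring

-- ---- B's ssum = pvPsum ----
theorem pvB_ssum_aux : ∀ (cs : List Int) (mask i : Nat) (acc : Int),
    (cs.zipIdx i).foldl (fun acc ci => if (mask >>> ci.2) &&& 1 = 1 then acc + ci.1 else acc) acc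
      = acc + pvPsum cs (mask >>> i) := by
  intro cs
  induction cs with
  | nil => intro mask i acc; simp [pvPsum]
  | cons c t IH =>
    intro mask i acc
    rw [List.zipIdx_cons, List.foldl_cons]
    rw [IH mask (i+1)]
    have h1 : (mask >>> i) &&& 1 = (mask >>> i) % 2 := Nat.and_one_is_mod _
    have h2 : mask >>> (i+1) = (mask >>> i) / 2 := Nat.shiftRight_succ mask i
    simp only [pvPsum, h1, h2]
    rcases Nat.mod_two_eq_zero_or_one (mask >>> i) with h | h <;> (simp [h]; try ring)

theorem pvB_ssum_eq (cs : List Int) (mask : Nat) : pvB_ssum cs mask = pvPsum cs mask := by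
  have h := pvB_ssum_aux cs mask 0 0
  simpa [pvB_ssum] using h

-- ---- A's SUM table ----
theorem pvA_sumInner_aux (cookies : List Int) (i : Nat) (hi : i < cookies.length) :
    ∀ (r : Nat) (S : List Int), r ≤ 2 ^ i → S.length = 2 ^ cookies.length →
    (∀ t, S.getD t 0 = if t < 2 ^ i then pvPsum cookies t else 0) →
    ((List.range r).foldl (fun S j => S.set (2 ^ i ||| j) (S.getD j 0 + cookies.getD i 0)) S).length = 2 ^ cookies.length ∧
    ∀ t, ((List.range r).foldl (fun S j => S.set (2 ^ i ||| j) (S.getD j 0 + cookies.getD i 0)) S).getD t 0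
        = if t < 2 ^ i ∨ (2 ^ i ≤ t ∧ t < 2 ^ i + r) then pvPsum cookies t else 0 := by
  intro r
  induction r with
  | zero =>
    intro S hr hlen hS
    refine ⟨hlen, ?_⟩
    intro t
    rw [List.range_zero, List.foldl_nil, hS]
    split <;> split <;> first | rfl | omega
  | succ r IHr =>
    intro S hr hlen hS
    obtain ⟨hlen1, hS1⟩ := IHr S (by omega) hlen hS
    rw [List.range_succ, List.foldl_append, List.foldl_cons, List.foldl_nil]
    set R := (List.range r).foldl (fun S j => S.set (2 ^ i ||| j) (S.getD j 0 + cookies.getD i 0)) S with hR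
    have hor : 2 ^ i ||| r = 2 ^ i + r := pv_or_pow_add i r (by omega)
    have hget : R.getD r 0 = pvPsum cookies r := by
      rw [hS1]
      have : r < 2 ^ i := by omega
      simp [this]
    have hpow : 2 ^ i + r < 2 ^ cookies.length := by
      have h1 : (2:Nat) ^ (i + 1) ≤ 2 ^ cookies.length := Nat.pow_le_pow_right (by omega) (by omega)
      have h2 : (2:Nat) ^ (i + 1) = 2 * 2 ^ i := by ring
      omega
    have hval : R.getD r 0 + cookies.getD i 0 = pvPsum cookies (2 ^ i + r) := by
      rw [hget, pvPsum_pow_add cookies i r (by omega)]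
      ring
    constructor
    · rw [List.length_set, hlen1]
    · intro t
      by_cases ht : t = 2 ^ i + r
      · subst ht
        have hcond : 2 ^ i + r < 2 ^ i ∨ (2 ^ i ≤ 2 ^ i + r ∧ 2 ^ i + r < 2 ^ i + (r + 1)) := by omega
        rw [hor, pv_getD_set_self R _ _ (by omega), hval, if_pos hcond]
      · rw [hor, pv_getD_set_ne R _ _ _ (fun h => ht h.symm), hS1]
        split <;> split <;> first | rfl | omega

theorem pvA_buildSUM_aux (cookies : List Int) : ∀ (cs : List Int) (i : Nat) (S : List Int),
    cookies.drop i = cs → S.length = 2 ^ cookies.length →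
    (∀ t, S.getD t 0 = if t < 2 ^ i then pvPsum cookies t else 0) →
    ((cs.zipIdx i).foldl (fun S iv => pvA_sumInner iv.1 (1 <<< iv.2) S) S).length = 2 ^ cookies.length ∧
    ∀ t, ((cs.zipIdx i).foldl (fun S iv => pvA_sumInner iv.1 (1 <<< iv.2) S) S).getD t 0
        = if t < 2 ^ (i + cs.length) then pvPsum cookies t else 0 := by
  intro cs
  induction cs with
  | nil =>
    intro i S _ hlen hS
    simpa using ⟨hlen, hS⟩
  | cons c cs' IH =>
    intro i S hdrop hlen hS
    have hi : i < cookies.length := by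
      by_contra h
      rw [List.drop_eq_nil_of_le (by omega)] at hdrop
      exact (List.cons_ne_nil c cs') hdrop.symm
    have hdrop2 := List.drop_eq_getElem_cons hi
    rw [hdrop] at hdrop2
    have hpair : c = cookies[i] ∧ cs' = cookies.drop (i + 1) := List.cons.inj hdrop2
    have hc : c = cookies[i] := hpair.1
    have hcs' : cookies.drop (i + 1) = cs' := hpair.2.symm
    simp only [List.zipIdx_cons, List.foldl_cons]
    have hshift : (1 <<< i) = 2 ^ i := by rw [Nat.shiftLeft_eq]; ring
    have hcv : c = cookies.getD i 0 := by
      rw [hc, List.getD_eq_getElem?_getD, List.getElem?_eq_getElem hi]; rfl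
    have hstep : pvA_sumInner c (1 <<< i) S
        = (List.range (2 ^ i)).foldl (fun S j => S.set (2 ^ i ||| j) (S.getD j 0 + cookies.getD i 0)) S := by
      rw [pvA_sumInner, hshift, hcv]
    rw [hstep]
    obtain ⟨hlen1, hS1⟩ := pvA_sumInner_aux cookies i hi (2 ^ i) S (le_refl _) hlen hS
    have hS1' : ∀ t, ((List.range (2 ^ i)).foldl (fun S j => S.set (2 ^ i ||| j) (S.getD j 0 + cookies.getD i 0)) S).getD t 0
        = if t < 2 ^ (i + 1) then pvPsum cookies t else 0 := by
      intro t
      rw [hS1 t]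
      have hp : (2:Nat) ^ (i + 1) = 2 * 2 ^ i := by ring
      split <;> split <;> first | rfl | omega
    obtain ⟨hlen2, hS2⟩ := IH (i + 1) _ hcs' hlen1 hS1'
    refine ⟨hlen2, ?_⟩
    intro t
    rw [hS2 t]
    have harith : i + 1 + cs'.length = i + (c :: cs').length := by
      simp [List.length_cons]; omega
    rw [harith]

theorem pvA_buildSUM_eq (cookies : List Int) :
    pvA_buildSUM cookies = (List.range (2 ^ cookies.length)).map (pvPsum cookies) := by
  have hshift : (1 <<< cookies.length) = 2 ^ cookies.length := by rw [Nat.shiftLeft_eq]; ring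
  have hrep : ∀ t, (List.replicate (1 <<< cookies.length) (0:Int)).getD t 0
      = if t < 2 ^ 0 then pvPsum cookies t else 0 := by
    intro t
    have hl : (List.replicate (1 <<< cookies.length) (0:Int)).getD t 0 = 0 := by
      rw [List.getD_eq_getElem?_getD, List.getElem?_replicate]
      split <;> rfl
    rw [hl]
    split
    · have ht : t = 0 := by omega
      rw [ht, pvPsum_zero]
    · rfl
  obtain ⟨hlen, hS⟩ := pvA_buildSUM_aux cookies cookies 0 (List.replicate (1 <<< cookies.length) 0)
    List.drop_zero (by rw [List.length_replicate, hshift]) hrep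
  apply List.ext_getElem
  · rw [List.length_map, List.length_range]
    unfold pvA_buildSUM
    exact hlen
  · intro t h1 h2
    have hlt : t < 2 ^ cookies.length := by
      rw [List.length_map, List.length_range] at h2; exact h2
    have hgd : (pvA_buildSUM cookies).getD t 0 = pvPsum cookies t := by
      unfold pvA_buildSUM
      rw [hS t]
      rw [if_pos (by rw [Nat.zero_add]; exact hlt)]
    calc (pvA_buildSUM cookies)[t]
        = (pvA_buildSUM cookies).getD t 0 := by
          rw [List.getD_eq_getElem?_getD, List.getElem?_eq_getElem h1]; rfl
      _ = pvPsum cookies t := hgd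
      _ = ((List.range (2 ^ cookies.length)).map (pvPsum cookies))[t] := by
          rw [List.getElem_map, List.getElem_range]

-- ---- chain list ----
def pvChainL (j : Nat) (s : Nat) : List Nat :=
  if hs : s = 0 then [] else s :: pvChainL j ((s - 1) &&& j)
termination_by s
decreasing_by
  have h1 : (s - 1) &&& j ≤ s - 1 := Nat.and_le_left
  omega

theorem pvChainL_mem : ∀ (s j t : Nat), s &&& j = s →
    (t ∈ pvChainL j s ↔ 0 < t ∧ t ≤ s ∧ t &&& j = t) := by
  intro s
  induction s using Nat.strong_induction_on with
  | _ s IH =>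
    intro j t hs
    by_cases h0 : s = 0
    · subst h0; rw [pvChainL]; simp; omega
    · rw [pvChainL]
      simp only [h0, dite_false, List.mem_cons]
      have hlt : (s - 1) &&& j < s := by
        have := Nat.and_le_left (n := s - 1) (m := j)
        omega
      have hsub : ((s - 1) &&& j) &&& j = (s - 1) &&& j := pv_and_j_j _ _
      rw [IH _ hlt j t hsub]
      constructor
      · rintro (rfl | ⟨h1, h2, h3⟩)
        · exact ⟨by omega, le_refl _, hs⟩
        · exact ⟨h1, by omega, h3⟩
      · rintro ⟨h1, h2, h3⟩
        by_cases hts : t = s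
        · exact Or.inl hts
        · exact Or.inr ⟨h1, pv_pred_submask s j t hs h3 (by omega), h3⟩

theorem pvChainL_pairwise : ∀ (s j : Nat), s &&& j = s → (pvChainL j s).Pairwise (· > ·) := by
  intro s
  induction s using Nat.strong_induction_on with
  | _ s IH =>
    intro j hs
    by_cases h0 : s = 0
    · subst h0; rw [pvChainL]; simp
    · rw [pvChainL]
      simp only [h0, dite_false]
      have hlt : (s - 1) &&& j < s := by
        have := Nat.and_le_left (n := s - 1) (m := j)
        omega
      have hsub : ((s - 1) &&& j) &&& j = (s - 1) &&& j := pv_and_j_j _ _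
      refine List.Pairwise.cons ?_ (IH _ hlt j hsub)
      intro t ht
      have := (pvChainL_mem _ j t hsub).mp ht
      omega

-- ---- A's while loop = one set of a fold over the chain ----
theorem pvA_chain_eq : ∀ (s : Nat) (SUM f : List Int) (j : Nat), j < f.length → s &&& j = s →
    pvA_chain SUM j f s
      = f.set j ((pvChainL j s).foldl
          (fun acc t => min acc (max (SUM.getD t 0) (f.getD (j ^^^ t) 0)))
          (f.getD j 0)) := by
  intro s
  induction s using Nat.strong_induction_on with
  | _ s IH =>
    intro SUM f j hj hs
    by_cases h0 : s = 0
    · subst h0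
      rw [pvA_chain, pvChainL]
      simp only [dite_true, List.foldl_nil]
      exact (pv_set_getD_self f j hj).symm
    · rw [pvA_chain, pvChainL]
      simp only [h0, dite_false]
      have hstep : (if (if SUM.getD s 0 > f.getD (j ^^^ s) 0 then SUM.getD s 0 else f.getD (j ^^^ s) 0) < f.getD j 0
              then f.set j (if SUM.getD s 0 > f.getD (j ^^^ s) 0 then SUM.getD s 0 else f.getD (j ^^^ s) 0) else f)
            = f.set j (min (f.getD j 0) (max (SUM.getD s 0) (f.getD (j ^^^ s) 0))) := by
        rw [pv_if_max]
        split
        · rw [min_eq_right (by omega)]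
        · rw [min_eq_left (by omega), pv_set_getD_self f j hj]
      rw [hstep]
      have hs' : ((s - 1) &&& j) &&& j = (s - 1) &&& j := pv_and_j_j _ _
      have hlt : (s - 1) &&& j < s := by
        have := Nat.and_le_left (n := s - 1) (m := j); omega
      set g := f.set j (min (f.getD j 0) (max (SUM.getD s 0) (f.getD (j ^^^ s) 0))) with hg
      have hjg : j < g.length := by simp [hg, hj]
      rw [IH _ hlt SUM g j hjg hs']
      have hcongr : (pvChainL j ((s - 1) &&& j)).foldl
            (fun acc t => min acc (max (SUM.getD t 0) (g.getD (j ^^^ t) 0)))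
            (g.getD j 0)
          = (pvChainL j ((s - 1) &&& j)).foldl
            (fun acc t => min acc (max (SUM.getD t 0) (f.getD (j ^^^ t) 0)))
            (min (f.getD j 0) (max (SUM.getD s 0) (f.getD (j ^^^ s) 0))) := by
        rw [pv_getD_set_self f j _ hj]
        apply PySem.List.foldl_congr_mem
        intro acc t ht
        have hmem := (pvChainL_mem _ j t hs').mp ht
        have hne : j ^^^ t ≠ j := by
          have := pv_xor_lt hmem.2.2 (by omega)
          omega
        rw [pv_getD_set_ne f j (j ^^^ t) _ (fun h => hne h.symm)]
      rw [hcongr, hg, List.set_set, List.foldl_cons]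

-- ---- chain fold = B's row entry ----
theorem pv_chain_fold_eq_newRow (SUM ss g row : List Int) (mask : Nat)
    (hSUM : ∀ t, t ≤ mask → SUM.getD t 0 = ss.getD t 0)
    (hg : ∀ t, t ≤ mask → g.getD t 0 = row.getD t 0) :
    (pvChainL mask mask).foldl
        (fun acc t => min acc (max (SUM.getD t 0) (g.getD (mask ^^^ t) 0)))
        (g.getD mask 0)
      = pvB_newRow ss row mask := by
  have hmm : mask &&& mask = mask := Nat.and_self mask
  have hcongr : (pvChainL mask mask).foldl
        (fun acc t => min acc (max (SUM.getD t 0) (g.getD (mask ^^^ t) 0)))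
        (g.getD mask 0)
      = (pvChainL mask mask).foldl
        (fun acc t => min acc (max (ss.getD t 0) (row.getD (mask ^^^ t) 0)))
        (g.getD mask 0) := by
    apply PySem.List.foldl_congr_mem
    intro acc t ht
    obtain ⟨h1, h2, h3⟩ := (pvChainL_mem mask mask t hmm).mp ht
    rw [hSUM t h2, hg (mask ^^^ t) (pv_submask_le (pv_xor_submask h3))]
  rw [hcongr, hg mask (le_refl mask)]
  have hperm : (pvChainL mask mask).Perm (pvB_subsets mask) := by
    apply (List.perm_ext_iff_of_nodup ?_ ?_).mpr
    · intro t
      rw [pvChainL_mem mask mask t hmm]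
      unfold pvB_subsets
      simp only [List.mem_filter, List.mem_range'_1, beq_iff_eq]
      constructor
      · rintro ⟨h1, h2, h3⟩; exact ⟨⟨by omega, by omega⟩, h3⟩
      · rintro ⟨⟨h1, h2⟩, h3⟩; exact ⟨by omega, by omega, h3⟩
    · exact (pvChainL_pairwise mask mask hmm).imp (fun hab => Nat.ne_of_gt hab)
    · exact List.Nodup.filter _ List.nodup_range'
  unfold pvB_newRow
  exact List.Perm.foldl_eq
    (f := fun (acc : Int) (s : Nat) => min acc (max (ss.getD s 0) (row.getD (mask ^^^ s) 0)))
    (rcomm := ⟨fun b x y => min_right_comm _ _ _⟩) hperm (row.getD mask 0)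

-- ---- one round of A = B's fresh row ----
theorem pvA_round_inner (SUM f : List Int) (M : Nat) :
    ∀ (c : Nat) (g : List Int), g.length = M → c < M →
    (∀ t, t ≤ c → g.getD t 0 = f.getD t 0) →
    (∀ t, c < t → t < M → g.getD t 0 = pvB_newRow SUM f t) →
    ((PySem.List.pyRange (c : Int) 0 (-1)).foldl (fun f j => pvA_chain SUM j.toNat f j.toNat) g).length = M ∧
    ∀ t, t < M → ((PySem.List.pyRange (c : Int) 0 (-1)).foldl (fun f j => pvA_chain SUM j.toNat f j.toNat) g).getD t 0
        = if t = 0 then f.getD 0 0 else pvB_newRow SUM f t := by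
  intro c
  induction c with
  | zero =>
    intro g hlen hc hold hnew
    rw [show ((0:Nat):Int) = 0 by norm_num, PySem.List.pyRange_neg_one_eq_nil (by omega), List.foldl_nil]
    refine ⟨hlen, ?_⟩
    intro t htM
    by_cases ht : t = 0
    · subst ht; rw [if_pos rfl]; exact hold 0 (le_refl 0)
    · rw [if_neg ht]; exact hnew t (by omega) htM
  | succ c IHc =>
    intro g hlen hc hold hnew
    have hcons : PySem.List.pyRange ((c+1 : Nat) : Int) 0 (-1)
        = ((c+1 : Nat) : Int) :: PySem.List.pyRange ((c : Nat) : Int) 0 (-1) := by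
      rw [PySem.List.pyRange_neg_one_cons (by push_cast; omega)]
      norm_num
    rw [hcons, List.foldl_cons]
    have htn : (((c+1 : Nat) : Int)).toNat = c + 1 := by omega
    rw [htn]
    have hjlen : c + 1 < g.length := by omega
    rw [pvA_chain_eq (c+1) SUM g (c+1) hjlen (Nat.and_self _)]
    rw [pv_chain_fold_eq_newRow SUM SUM g f (c+1) (fun t _ => rfl) (fun t ht => hold t ht)]
    apply IHc
    · rw [List.length_set]; exact hlen
    · omega
    · intro t ht
      rw [pv_getD_set_ne g _ _ _ (by omega), hold t (by omega)]
    · intro t ht htM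
      by_cases hteq : t = c + 1
      · subst hteq
        rw [pv_getD_set_self g _ _ hjlen]
      · rw [pv_getD_set_ne g _ _ _ (fun h => hteq h.symm), hnew t (by omega) htM]

theorem pvB_newRow_zero (SUM f : List Int) : pvB_newRow SUM f 0 = f.getD 0 0 := by
  unfold pvB_newRow pvB_subsets
  rw [List.range'_zero, List.filter_nil, List.foldl_nil]

theorem pvA_round_eq (SUM : List Int) (M : Nat) (hM : 0 < M) (f : List Int) (hf : f.length = M) :
    pvA_round SUM M f = (List.range M).map (pvB_newRow SUM f) := by
  unfold pvA_round
  have hM1 : ((M : Int) - 1) = ((M - 1 : Nat) : Int) := by omega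
  rw [hM1]
  obtain ⟨hlen, hvals⟩ := pvA_round_inner SUM f M (M - 1) f hf (by omega)
    (fun t _ => rfl) (fun t ht htM => by omega)
  apply List.ext_getElem
  · rw [hlen, List.length_map, List.length_range]
  · intro t h1 h2
    have htM : t < M := by rwa [hlen] at h1
    have hL : _ = _ := hvals t htM
    rw [List.getD_eq_getElem?_getD, List.getElem?_eq_getElem h1] at hL
    simp only [Option.getD_some] at hL
    rw [hL]
    have hrange : t < (List.range M).length := by rwa [List.length_range]
    rw [List.getElem_map, List.getElem_range]
    by_cases ht : t = 0
    · subst ht; rw [pvB_newRow_zero]; simp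
    · simp [ht]

-- ---- the k-1 rounds, in parallel ----
theorem pv_rounds (SUM : List Int) (M : Nat) (hM : 0 < M) :
    ∀ (l : List Int) (g : List Int), g.length = M →
    l.foldl (fun f _ => pvA_round SUM M f) g
      = l.foldl (fun row _ => (List.range M).map (pvB_newRow SUM row)) g := by
  intro l
  induction l with
  | nil => intro g _; rfl
  | cons x l IH =>
    intro g hg
    rw [List.foldl_cons, List.foldl_cons, pvA_round_eq SUM M hM g hg]
    exact IH _ (by rw [List.length_map, List.length_range])

-- ===== VERDICT (by name: the statement is the Claim_ definition above) =====
theorem distributeCookies2_spec : Claim_equal_distributeCookies2 := by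
  intro cookies k _
  unfold Spec_distributeCookies2
  show distributeCookies2 cookies k = distributeCookies2_alt cookies k
  have hshift : (1 <<< cookies.length) = 2 ^ cookies.length := by rw [Nat.shiftLeft_eq]; ring
  have hssum : pvB_ssum cookies = pvPsum cookies := funext (pvB_ssum_eq cookies)
  have hSUM : pvA_buildSUM cookies = (List.range (1 <<< cookies.length)).map (pvB_ssum cookies) := by
    rw [pvA_buildSUM_eq, hssum, hshift]
  show (PySem.List.pyGet? ((PySem.List.pyRange 1 k 1).foldl
      (fun f _ => pvA_round (pvA_buildSUM cookies) (1 <<< cookies.length) f)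
      (pvA_buildSUM cookies)) (-1)).getD 0
    = (PySem.List.pyGet? ((PySem.List.pyRange 1 k 1).foldl
      (fun row _ => (List.range (1 <<< cookies.length)).map
        (pvB_newRow ((List.range (1 <<< cookies.length)).map (pvB_ssum cookies)) row))
      ((List.range (1 <<< cookies.length)).map (pvB_ssum cookies))) (-1)).getD 0
  rw [hSUM]
  rw [pv_rounds ((List.range (1 <<< cookies.length)).map (pvB_ssum cookies)) (1 <<< cookies.length)
    (by rw [hshift]; exact pow_pos (by omega) _) (PySem.List.pyRange 1 k 1)
    ((List.range (1 <<< cookies.length)).map (pvB_ssum cookies))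
    (by rw [List.length_map, List.length_range])]
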